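-- pv_equiv track=rewrite | github.com/S-Christensen/cartographersStudy | spring/midgameEvaluation.py | brokenRoad_progress
-- ===== SOURCE A (Python) =====
-- def brokenRoad_progress(grid):
--     rows, cols = len(grid), len(grid[0])
--     count = 0
--
--     for start in range(rows):
--         r, c = start, 0
--         diagonal = []
--         while r >= 0 and c < cols:
--             diagonal.append(grid[r][c])
--             r -= 1
--             c += 1
--
--         if all(cell not in ("0", "Ruins") for cell in diagonal):
--             count += 1
--
--     return count * 3
-- ===== SOURCE B (Python) =====
-- def brokenRoad_progress(grid):
--     rows, cols = len(grid), len(grid[0])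
--     blocked = [False] * rows
--     for r, row in enumerate(grid):
--         for c in range(cols):
--             d = r + c
--             if d < rows and row[c] in ("0", "Ruins"):
--                 blocked[d] = True
--     return 3 * sum(1 for d in range(rows) if not blocked[d])
-- ===== Notes on version B (the rewrite author's own statement) =====
-- stated objective: alternative
-- what changed: Replaces the per-start-row while-loop that collects each anti-diagonal into a list and tests it with a single row-major sweep that marks a boolean blocked-table indexed by diagonal number d=r+c, then counts unmarked diagonals.
import Mathlib
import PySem

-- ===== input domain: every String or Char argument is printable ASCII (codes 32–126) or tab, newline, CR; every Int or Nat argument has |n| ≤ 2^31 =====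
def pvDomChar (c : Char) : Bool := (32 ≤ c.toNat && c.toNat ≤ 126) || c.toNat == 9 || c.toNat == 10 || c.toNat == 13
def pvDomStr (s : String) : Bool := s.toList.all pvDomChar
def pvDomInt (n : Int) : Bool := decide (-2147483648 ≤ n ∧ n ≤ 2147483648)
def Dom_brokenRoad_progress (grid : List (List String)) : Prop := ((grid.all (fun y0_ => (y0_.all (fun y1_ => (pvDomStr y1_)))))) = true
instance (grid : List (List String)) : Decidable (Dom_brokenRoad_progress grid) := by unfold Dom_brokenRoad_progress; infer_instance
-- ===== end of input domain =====

-- B replaces A's per-start while-loop that collects each anti-diagonal into a list with a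
-- single row-major sweep marking a boolean table indexed by diagonal number d = r + c
-- (objective: alternative decomposition; return value only, no mutation is observable).

-- ===== PORT A =====
-- while r >= 0 and c < cols: diagonal.append(grid[r][c]); r -= 1; c += 1
def pvDiagLoop (grid : List (List String)) (cols : Int) (r c : Int) (diagonal : List String) : List String :=
  if _h : 0 ≤ r ∧ c < cols then
    pvDiagLoop grid cols (r - 1) (c + 1)
      (diagonal ++ [(PySem.List.pyGet? ((PySem.List.pyGet? grid r).getD []) c).getD ""])
  else diagonal
termination_by (r + 1).toNat
decreasing_by omega

def brokenRoad_progress (grid : List (List String)) : Int :=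
  let rows : Int := (grid.length : Int)
  let cols : Int := (((PySem.List.pyGet? grid 0).getD []).length : Int)
  ((PySem.List.pyRange 0 rows 1).foldl (fun count start =>
    if (pvDiagLoop grid cols start 0 []).all (fun cell => !(cell == "0" || cell == "Ruins"))
    then count + 1 else count) (0 : Int)) * 3

-- ===== PORT B =====
def brokenRoad_progress_alt (grid : List (List String)) : Int :=
  let rows : Int := (grid.length : Int)
  let cols : Int := (((PySem.List.pyGet? grid 0).getD []).length : Int)
  let blocked : List Bool :=
    (PySem.List.enumerate grid 0).foldl (fun blocked rrow =>
      (PySem.List.pyRange 0 cols 1).foldl (fun blocked c =>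
        if rrow.1 + c < rows ∧ (PySem.List.pyGetD rrow.2 c "" == "0" || PySem.List.pyGetD rrow.2 c "" == "Ruins")
        then PySem.List.pySetD blocked (rrow.1 + c) true else blocked) blocked)
      (List.replicate grid.length false)
  3 * ((PySem.List.pyRange 0 rows 1).foldl (fun s d =>
    if !(PySem.List.pyGetD blocked d false) then s + 1 else s) (0 : Int))

-- ===== PRECONDITION & SPEC =====
-- Pre_ excludes exactly the inputs on which Python A raises IndexError: the empty grid
-- (grid[0]) and ragged grids where some row is too short for a cell its anti-diagonals read.
def Pre_brokenRoad_progress (grid : List (List String)) : Prop :=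
  grid ≠ [] ∧ ∀ r : Nat, r < grid.length →
    min (grid.headD []).length (grid.length - r) ≤ (grid.getD r []).length
instance (grid : List (List String)) : Decidable (Pre_brokenRoad_progress grid) := by
  unfold Pre_brokenRoad_progress; infer_instance

def pvWitness_brokenRoad_progress : List (List String) := [["1", "Ruins"], ["1", "0"]]

def Spec_brokenRoad_progress (grid : List (List String)) (out : Int) : Prop := out = brokenRoad_progress_alt grid
instance (grid : List (List String)) (out : Int) : Decidable (Spec_brokenRoad_progress grid out) := by unfold Spec_brokenRoad_progress; infer_instance

-- ===== CLAIM (what is proved, stated in full; the proofs are below) =====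
def Claim_equal_brokenRoad_progress : Prop := ∀ (grid : List (List String)), Dom_brokenRoad_progress grid → Pre_brokenRoad_progress grid → Spec_brokenRoad_progress grid (brokenRoad_progress grid)


-- ===== LEMMAS AND PROOFS =====

-- Proof-side vocabulary
def pvBad (s : String) : Bool := (s == "0" || s == "Ruins")

def pvCellN (grid : List (List String)) (r c : Nat) : String := (grid.getD r []).getD c ""

-- "anti-diagonal d is fully open" (cells (d-c, c) for c < min (d+1) cols)
def pvClear (grid : List (List String)) (cols d : Nat) : Bool :=
  (List.range (min (d + 1) cols)).all (fun c => !pvBad (pvCellN grid (d - c) c))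

-- "some cell of row r (at columns < cols) blocks diagonal d (, d < rowsN)"
def pvRowAny (row : List String) (cols rowsN r d : Nat) : Bool :=
  (List.range cols).any (fun c => decide (r + c = d) && decide (r + c < rowsN) && pvBad (row.getD c ""))

-- same, over the rows of g numbered from s
def pvGridAny (g : List (List String)) (cols rowsN s d : Nat) : Bool :=
  match g with
  | [] => false
  | row :: t => pvRowAny row cols rowsN s d || pvGridAny t cols rowsN (s + 1) d

theorem pv_all_congr {α : Type} {l : List α} {p q : α → Bool} (h : ∀ x ∈ l, p x = q x) :
    l.all p = l.all q := by
  induction l with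
  | nil => rfl
  | cons x t ih =>
      simp only [List.all_cons, h x (by simp), ih fun y hy => h y (by simp [hy])]

-- counting fold = countP
theorem pv_foldl_count {a : Type} (p : a -> Bool) (l : List a) (i : Int) :
    l.foldl (fun acc x => if p x then acc + 1 else acc) i = i + (l.countP p : Int) := by
  induction l generalizing i with
  | nil => simp
  | cons x t ih =>
      by_cases h : p x = true
      · simp [h, ih]
        ring
      · simp [h, ih]

-- A's while loop produces exactly the anti-diagonal cells
theorem pvDiagLoop_eq (grid : List (List String)) (cols r c : Int) (acc : List String) :
    pvDiagLoop grid cols r c acc =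
      acc ++ (List.range (min (r + 1).toNat (cols - c).toNat)).map
        (fun (i : Nat) => (PySem.List.pyGet? ((PySem.List.pyGet? grid (r - (i : Int))).getD []) (c + (i : Int))).getD "") := by
  fun_induction pvDiagLoop grid cols r c acc with
  | case1 r c acc h ih =>
      obtain ⟨hr, hc⟩ := h
      have hn : min (r + 1).toNat (cols - c).toNat
          = (min ((r - 1) + 1).toNat (cols - (c + 1)).toNat) + 1 := by omega
      rw [hn, List.range_succ_eq_map, List.map_cons, List.map_map, ih]
      simp only [Nat.cast_zero, sub_zero, add_zero, List.append_assoc, List.singleton_append]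
      refine congrArg _ (congrArg _ (List.map_congr_left fun i _ => ?_))
      simp only [Function.comp, Nat.succ_eq_add_one]
      push_cast
      ring_nf
  | case2 r c acc h =>
      have hn : min (r + 1).toNat (cols - c).toNat = 0 := by omega
      rw [hn]
      simp

-- A's per-start test is pvClear
theorem pvDiag_all_eq (grid : List (List String)) (colsN k : Nat) :
    ((pvDiagLoop grid ((colsN : Nat) : Int) ((k : Nat) : Int) 0 []).all
        (fun cell => !(cell == "0" || cell == "Ruins")))
      = pvClear grid colsN k := by
  rw [pvDiagLoop_eq]
  simp only [List.nil_append]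
  have hm : ((k : Int) + 1).toNat = k + 1 := by omega
  have hm2 : ((colsN : Int) - 0).toNat = colsN := by omega
  rw [hm, hm2, List.all_map, pvClear]
  refine pv_all_congr fun i hi => ?_
  have hik : i ≤ k := by have := List.mem_range.mp hi; omega
  have h1 : (k : Int) - (i : Int) = ((k - i : Nat) : Int) := by omega
  simp only [Function.comp, h1, zero_add, PySem.List.pyGet?_natCast]
  simp [pvBad, pvCellN, List.getD_eq_getElem?_getD]

-- A = countP pvClear * 3
theorem pvA_eq (grid : List (List String)) :
    brokenRoad_progress grid =
      ((List.range grid.length).countP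
        (fun k => pvClear grid ((PySem.List.pyGet? grid 0).getD []).length k) : Int) * 3 := by
  simp only [brokenRoad_progress]
  rw [PySem.List.pyRange_one]
  simp only [sub_zero, Int.toNat_natCast, zero_add, List.foldl_map]
  rw [pv_foldl_count (fun (k : Nat) =>
    (pvDiagLoop grid (((PySem.List.pyGet? grid 0).getD []).length : Int) (k : Int) 0 []).all
      (fun cell => !(cell == "0" || cell == "Ruins")))]
  rw [List.countP_congr (fun k _ => by rw [pvDiag_all_eq grid ((PySem.List.pyGet? grid 0).getD []).length k])]
  ring

-- Nat-level model of B's inner column loop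
def pvSweepRow (row : List String) (rowsN rn m : Nat) (blocked : List Bool) : List Bool :=
  (List.range m).foldl
    (fun b c => if rn + c < rowsN ∧ pvBad (row.getD c "") then b.set (rn + c) true else b) blocked

-- Nat-level model of B's row sweep
def pvSweep (rowsN colsN : Nat) : List (List String) → Nat → List Bool → List Bool
  | [], _, blocked => blocked
  | row :: t, s, blocked => pvSweep rowsN colsN t (s + 1) (pvSweepRow row rowsN s colsN blocked)

theorem pvSweepRow_len (row : List String) (rowsN rn m : Nat) (blocked : List Bool) :
    (pvSweepRow row rowsN rn m blocked).length = blocked.length := by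
  unfold pvSweepRow
  induction m with
  | zero => rfl
  | succ k ih =>
      rw [List.range_succ, List.foldl_append, List.foldl_cons, List.foldl_nil]
      split_ifs
      · rw [List.length_set]; exact ih
      · exact ih

theorem pvSweepRow_getD (row : List String) (rowsN rn m : Nat) (blocked : List Bool)
    (hlen : blocked.length = rowsN) (d : Nat) :
    (pvSweepRow row rowsN rn m blocked).getD d false
      = (blocked.getD d false || pvRowAny row m rowsN rn d) := by
  induction m with
  | zero => simp [pvSweepRow, pvRowAny]
  | succ k ih =>
      have hK : (pvSweepRow row rowsN rn k blocked).length = blocked.length :=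
        pvSweepRow_len row rowsN rn k blocked
      have hstep : pvSweepRow row rowsN rn (k + 1) blocked
          = (if rn + k < rowsN ∧ pvBad (row.getD k "") then
              (pvSweepRow row rowsN rn k blocked).set (rn + k) true
             else pvSweepRow row rowsN rn k blocked) := by
        unfold pvSweepRow
        rw [List.range_succ, List.foldl_append, List.foldl_cons, List.foldl_nil]
      have hany : pvRowAny row (k + 1) rowsN rn d
          = (pvRowAny row k rowsN rn d ||
             (decide (rn + k = d) && decide (rn + k < rowsN) && pvBad (row.getD k ""))) := by
        simp [pvRowAny, List.range_succ]
      rw [hstep, hany]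
      split_ifs with hc
      · obtain ⟨h1, h2⟩ := hc
        by_cases hd : rn + k = d
        · subst hd
          have hidx : rn + k < (pvSweepRow row rowsN rn k blocked).length := by
            rw [hK, hlen]; exact h1
          simp [List.getD_eq_getElem?_getD, hidx, h1]
          exact Or.inr (Or.inr (by simpa [List.getD_eq_getElem?_getD] using h2))
        · rw [List.getD_eq_getElem?_getD, List.getElem?_set]
          simp only [if_neg (by omega : ¬ (rn + k = d))]
          rw [← List.getD_eq_getElem?_getD, ih]
          simp [hd]
      · have hb : (decide (rn + k = d) && decide (rn + k < rowsN) && pvBad (row.getD k "")) = false := by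
          rcases not_and_or.mp hc with h1 | h1
          · simp [h1]
          · have hf : pvBad (row.getD k "") = false := by
              cases hpb : pvBad (row.getD k "") with
              | false => rfl
              | true => exact absurd hpb h1
            simp only [List.getD_eq_getElem?_getD] at hf
            simp [hf]
        rw [ih, hb]
        simp

theorem pvSweep_getD (rowsN colsN : Nat) (g : List (List String)) (s : Nat) (blocked : List Bool)
    (hlen : blocked.length = rowsN) (d : Nat) :
    (pvSweep rowsN colsN g s blocked).getD d false
      = (blocked.getD d false || pvGridAny g colsN rowsN s d) := by
  induction g generalizing s blocked with
  | nil => simp [pvSweep, pvGridAny]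
  | cons row t ih =>
      rw [pvSweep, ih _ _ (by rw [pvSweepRow_len]; exact hlen),
        pvSweepRow_getD row rowsN s colsN blocked hlen, pvGridAny, Bool.or_assoc]

-- the port's inner Int fold is pvSweepRow
theorem pv_inner_bridge (colsN rowsN s : Nat) (row : List String) (blocked : List Bool) :
    ((PySem.List.pyRange 0 ((colsN : Nat) : Int) 1).foldl (fun b c =>
        let d := ((s : Nat) : Int) + c
        if d < ((rowsN : Nat) : Int) ∧
            (PySem.List.pyGetD row c "" == "0" || PySem.List.pyGetD row c "" == "Ruins")
        then PySem.List.pySetD b d true else b) blocked) = pvSweepRow row rowsN s colsN blocked := by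
  rw [PySem.List.pyRange_one]
  simp only [sub_zero, Int.toNat_natCast, zero_add, List.foldl_map]
  unfold pvSweepRow
  apply PySem.List.foldl_congr_mem
  intro b c _
  have hcast : ((s : Int) + (c : Int)) = (((s + c : Nat)) : Int) := by push_cast; ring
  refine if_congr ?_ ?_ rfl
  · simp only [pvBad, PySem.List.pyGetD_natCast]
    constructor <;> rintro ⟨h1, h2⟩ <;> exact ⟨by omega, by simpa using h2⟩
  · rw [hcast, PySem.List.pySetD_natCast]

-- the port's enumerate fold is pvSweep
theorem pv_outer_bridge (colsN rowsN : Nat) (g : List (List String)) (s : Nat) (blocked : List Bool) :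
    ((PySem.List.enumerate g ((s : Nat) : Int)).foldl (fun blocked rrow =>
        (PySem.List.pyRange 0 ((colsN : Nat) : Int) 1).foldl (fun blocked c =>
          if rrow.1 + c < ((rowsN : Nat) : Int) ∧
              (PySem.List.pyGetD rrow.2 c "" == "0" || PySem.List.pyGetD rrow.2 c "" == "Ruins")
          then PySem.List.pySetD blocked (rrow.1 + c) true else blocked) blocked) blocked)
      = pvSweep rowsN colsN g s blocked := by
  induction g generalizing s blocked with
  | nil => rfl
  | cons row t ih =>
      rw [PySem.List.enumerate_cons, List.foldl_cons, pvSweep]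
      have h1 : ((s : Int) + 1) = (((s + 1 : Nat)) : Int) := by push_cast; ring
      rw [pv_inner_bridge, h1, ih]

theorem pv_outer_bridge0 (colsN rowsN : Nat) (g : List (List String)) (blocked : List Bool) :
    ((PySem.List.enumerate g (0 : Int)).foldl (fun blocked rrow =>
        (PySem.List.pyRange 0 ((colsN : Nat) : Int) 1).foldl (fun blocked c =>
          if rrow.1 + c < ((rowsN : Nat) : Int) ∧
              (PySem.List.pyGetD rrow.2 c "" == "0" || PySem.List.pyGetD rrow.2 c "" == "Ruins")
          then PySem.List.pySetD blocked (rrow.1 + c) true else blocked) blocked) blocked)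
      = pvSweep rowsN colsN g 0 blocked := by
  simpa using pv_outer_bridge colsN rowsN g 0 blocked

-- B = 3 * countP (not gridAny)
theorem pvB_eq (grid : List (List String)) :
    brokenRoad_progress_alt grid =
      3 * ((List.range grid.length).countP
        (fun d => !pvGridAny grid ((PySem.List.pyGet? grid 0).getD []).length grid.length 0 d) : Int) := by
  simp only [brokenRoad_progress_alt]
  rw [pv_outer_bridge0 ((PySem.List.pyGet? grid 0).getD []).length grid.length grid
    (List.replicate grid.length false)]
  rw [PySem.List.pyRange_one]
  simp only [sub_zero, Int.toNat_natCast, zero_add, List.foldl_map]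
  rw [pv_foldl_count (fun (k : Nat) =>
    !(PySem.List.pyGetD (pvSweep grid.length ((PySem.List.pyGet? grid 0).getD []).length grid 0
      (List.replicate grid.length false)) (k : Int) false))]
  have hcount : List.countP (fun (k : Nat) =>
      !(PySem.List.pyGetD (pvSweep grid.length ((PySem.List.pyGet? grid 0).getD []).length grid 0
        (List.replicate grid.length false)) (k : Int) false)) (List.range grid.length)
      = List.countP (fun d => !pvGridAny grid ((PySem.List.pyGet? grid 0).getD []).length
          grid.length 0 d) (List.range grid.length) := by
    refine List.countP_congr (fun k _ => ?_)
    rw [PySem.List.pyGetD_natCast, List.getD_eq_getElem?_getD, ← List.getD_eq_getElem?_getD,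
      pvSweep_getD _ _ _ _ _ (List.length_replicate) k]
    have hrep : (List.replicate grid.length false).getD k false = false := by
      rw [List.getD_eq_getElem?_getD, List.getElem?_replicate]
      split_ifs <;> rfl
    rw [hrep, Bool.false_or]
  rw [hcount]
  ring

-- gridAny, membership form
theorem pvGridAny_iff (g : List (List String)) (colsN rowsN s d : Nat) :
    pvGridAny g colsN rowsN s d = true ↔
      ∃ i < g.length, ∃ c < colsN, s + i + c = d ∧ d < rowsN ∧ pvBad ((g.getD i []).getD c "") := by
  induction g generalizing s with
  | nil => simp [pvGridAny]
  | cons row t ih =>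
      rw [pvGridAny, Bool.or_eq_true, ih, pvRowAny, List.any_eq_true]
      constructor
      · rintro (⟨c, hc, hcl⟩ | ⟨i, hi, c, hc, h1, h2, h3⟩)
        · simp only [Bool.and_eq_true, decide_eq_true_eq] at hcl
          obtain ⟨⟨he, hlt⟩, hb⟩ := hcl
          exact ⟨0, by simp, c, List.mem_range.mp hc, by omega, by omega, by simpa using hb⟩
        · exact ⟨i + 1, by simpa using hi, c, hc, by omega, h2, by simpa using h3⟩
      · rintro ⟨i, hi, c, hc, h1, h2, h3⟩
        cases i with
        | zero =>
            left
            refine ⟨c, List.mem_range.mpr hc, ?_⟩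
            simp only [Bool.and_eq_true, decide_eq_true_eq]
            exact ⟨⟨by omega, by omega⟩, by simpa using h3⟩
        | succ j =>
            right
            exact ⟨j, by simpa using hi, c, hc, by omega, h2, by simpa using h3⟩

-- the two per-diagonal tests agree below rows
theorem pv_point (grid : List (List String)) (colsN d : Nat) (hd : d < grid.length) :
    pvClear grid colsN d = !pvGridAny grid colsN grid.length 0 d := by
  have hiff : pvClear grid colsN d = true ↔ ¬ (pvGridAny grid colsN grid.length 0 d = true) := by
    rw [pvGridAny_iff, pvClear, List.all_eq_true]
    constructor
    · rintro hall ⟨i, hi, c, hc, h1, h2, h3⟩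
      have hmem : c ∈ List.range (min (d + 1) colsN) := List.mem_range.mpr (by omega)
      have := hall c hmem
      simp only [Bool.not_eq_true'] at this
      have hcell : pvCellN grid (d - c) c = (grid.getD i []).getD c "" := by
        have : d - c = i := by omega
        rw [pvCellN, this]
      rw [hcell] at this
      rw [this] at h3
      exact absurd h3 (by simp)
    · intro hnone c hmem
      have hc := List.mem_range.mp hmem
      simp only [Bool.not_eq_true']
      cases hb : pvBad (pvCellN grid (d - c) c) with
      | false => rfl
      | true =>
          exact absurd ⟨d - c, by omega, c, by omega, by omega, hd, by simpa [pvCellN] using hb⟩ hnone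
  cases hga : pvGridAny grid colsN grid.length 0 d with
  | false => simpa using hiff.mpr (by simp [hga])
  | true => simpa using fun h => (hiff.mp h) hga

-- ===== VERDICT (by name: the statement is the Claim_ definition above) =====
theorem brokenRoad_progress_spec : Claim_equal_brokenRoad_progress := by
  intro grid _ _
  unfold Spec_brokenRoad_progress
  rw [pvA_eq, pvB_eq]
  rw [List.countP_congr (fun k hk => by
    rw [pv_point grid _ k (List.mem_range.mp hk)])]
  ring
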